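-- pv_equiv track=rewrite | github.com/lunaplush/hope | base.py | cumsum_and_erase
-- ===== SOURCE A (Python) =====
-- def cumsum_and_erase(A, erase=1):
--     B = []
--     sum = 0
--     for i in A:
--         sum += i
--         if sum!=erase:
--             B.append(sum)
--     return B
-- ===== SOURCE B (Python) =====
-- def cumsum_and_erase(A, erase=1):
--     # Stage 1: materialize the full list of prefix sums (no filtering here).
--     prefix = list(A)
--     for i in range(1, len(prefix)):
--         prefix[i] += prefix[i - 1]
--     # Stage 2: keep the prefix sums that differ from erase.
--     return [v for v in prefix if v != erase]
-- ===== Notes on version B (the rewrite author's own statement) =====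
-- stated objective: alternative
-- what changed: B replaces A's fused running-total-and-append loop by two separate stages: an in-place prefix-sum pass over a copy of the list (prefix[i] += prefix[i-1], no running accumulator variable) followed by an independent filtering comprehension.
import Mathlib
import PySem

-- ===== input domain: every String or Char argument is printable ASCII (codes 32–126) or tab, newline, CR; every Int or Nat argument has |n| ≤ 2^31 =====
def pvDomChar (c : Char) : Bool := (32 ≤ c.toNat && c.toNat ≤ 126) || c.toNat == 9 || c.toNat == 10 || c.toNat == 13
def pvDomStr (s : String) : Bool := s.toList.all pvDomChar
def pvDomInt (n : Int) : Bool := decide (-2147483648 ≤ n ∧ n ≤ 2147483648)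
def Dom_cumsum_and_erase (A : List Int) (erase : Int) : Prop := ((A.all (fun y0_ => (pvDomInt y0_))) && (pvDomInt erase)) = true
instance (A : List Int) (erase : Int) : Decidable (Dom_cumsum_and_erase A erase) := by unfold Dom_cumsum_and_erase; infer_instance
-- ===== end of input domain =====

-- B splits A's fused loop into two stages: an in-place index-driven prefix-sum pass, then a separate filter (alternative decomposition, same cost).


-- ===== PORT A =====
-- forward loop: running total, append when ≠ erase
def cumsum_and_erase (A : List Int) (erase : Int) : List Int :=
  (A.foldl (fun (st : Int × List Int) i =>
      let s := st.1 + i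
      if s ≠ erase then (s, st.2 ++ [s]) else (s, st.2)) (0, [])).2

-- ===== PORT B =====
-- stage 1: in-place prefix-sum pass over indices 1..len-1 (all indices are in range, so pySetD/pyGetD are exact);
-- stage 2: filtering comprehension
def cumsum_and_erase_alt (A : List Int) (erase : Int) : List Int :=
  let pre := (PySem.List.pyRange 1 (A.length : Int) 1).foldl
      (fun p i => PySem.List.pySetD p i (PySem.List.pyGetD p i 0 + PySem.List.pyGetD p (i - 1) 0)) A
  pre.filter (fun v => decide (v ≠ erase))

-- ===== PRECONDITION & SPEC =====
def Spec_cumsum_and_erase (A : List Int) (erase : Int) (out : List Int) : Prop := out = cumsum_and_erase_alt A erase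
instance (A : List Int) (erase : Int) (out : List Int) : Decidable (Spec_cumsum_and_erase A erase out) := by unfold Spec_cumsum_and_erase; infer_instance

-- ===== CLAIM (what is proved, stated in full; the proofs are below) =====
def Claim_equal_cumsum_and_erase : Prop := ∀ (A : List Int) (erase : Int), Dom_cumsum_and_erase A erase → Spec_cumsum_and_erase A erase (cumsum_and_erase A erase)

-- ===== LEMMAS AND PROOFS =====

-- prefix sums of L starting from running total s
def preSums (s : Int) : List Int → List Int
  | [] => []
  | x :: xs => (s + x) :: preSums (s + x) xs

theorem length_preSums (s : Int) (L : List Int) : (preSums s L).length = L.length := by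
  induction L generalizing s with
  | nil => rfl
  | cons x xs ih => simp [preSums, ih]

theorem preSums_append (s : Int) (P Q : List Int) :
    preSums s (P ++ Q) = preSums s P ++ preSums (s + P.sum) Q := by
  induction P generalizing s with
  | nil => simp [preSums]
  | cons x xs ih => simp [preSums, ih, add_assoc]

theorem preSums_getD_last (s : Int) (L : List Int) (h : L ≠ []) :
    (preSums s L).getD (L.length - 1) 0 = s + L.sum := by
  induction L generalizing s with
  | nil => exact absurd rfl h
  | cons x xs ih =>
    cases xs with
    | nil => simp [preSums]
    | cons y ys =>
      have := ih (s := s + x) (by simp)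
      simpa [preSums, add_assoc] using this

theorem a_fold (erase : Int) (L : List Int) : ∀ (s : Int) (acc : List Int),
    (L.foldl (fun (st : Int × List Int) i =>
        let v := st.1 + i
        if v ≠ erase then (v, st.2 ++ [v]) else (v, st.2)) (s, acc)).2
      = acc ++ (preSums s L).filter (fun v => v ≠ erase) := by
  induction L with
  | nil => simp [preSums]
  | cons x xs ih =>
    intro s acc
    rw [List.foldl_cons]
    by_cases h : s + x = erase
    · rw [show (let v := (s, acc).1 + x
          if v ≠ erase then (v, (s, acc).2 ++ [v]) else (v, (s, acc).2)) = ((s + x, acc) : Int × List Int) from by simp [h]]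
      rw [ih]; simp [preSums, h]
    · rw [show (let v := (s, acc).1 + x
          if v ≠ erase then (v, (s, acc).2 ++ [v]) else (v, (s, acc).2)) = ((s + x, acc ++ [s + x]) : Int × List Int) from by simp [h]]
      rw [ih]; simp [preSums, h]

-- one step of B's index loop preserves the invariant
theorem b_step (A : List Int) (k : Nat) (h1 : 1 ≤ k) (h2 : k < A.length) :
    PySem.List.pySetD (preSums 0 (A.take k) ++ A.drop k) (k : Int)
        (PySem.List.pyGetD (preSums 0 (A.take k) ++ A.drop k) (k : Int) 0
          + PySem.List.pyGetD (preSums 0 (A.take k) ++ A.drop k) ((k : Int) - 1) 0)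
      = preSums 0 (A.take (k + 1)) ++ A.drop (k + 1) := by
  have hPlen : (preSums 0 (A.take k)).length = k := by
    rw [length_preSums, List.length_take]; omega
  have hdrop : A.drop k = A[k] :: A.drop (k + 1) := List.drop_eq_getElem_cons h2
  have hg1 : PySem.List.pyGetD (preSums 0 (A.take k) ++ A.drop k) (k : Int) 0 = A[k] := by
    rw [PySem.List.pyGetD_natCast, hdrop]
    unfold List.getD
    rw [List.getElem?_append_right (by omega)]
    simp [hPlen, List.getElem?_eq_getElem h2]
  have hg2 : PySem.List.pyGetD (preSums 0 (A.take k) ++ A.drop k) ((k : Int) - 1) 0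
      = (A.take k).sum := by
    have hc : ((k : Int) - 1) = ((k - 1 : Nat) : Int) := by omega
    rw [hc, PySem.List.pyGetD_natCast]
    unfold List.getD
    rw [List.getElem?_append_left (by rw [hPlen]; omega)]
    have hne : A.take k ≠ [] := List.ne_nil_of_length_pos (by rw [List.length_take]; omega)
    have hlast := preSums_getD_last 0 (A.take k) hne
    rw [List.length_take] at hlast
    have hkk : min k A.length - 1 = k - 1 := by omega
    rw [hkk] at hlast
    unfold List.getD at hlast
    rw [hlast, zero_add]
  have htake : A.take (k + 1) = A.take k ++ [A[k]] := by
    rw [List.take_add_one]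
    simp [List.getElem?_eq_getElem h2]
  rw [hg1, hg2, PySem.List.pySetD_natCast, htake, preSums_append, List.set_append, hPlen]
  simp [preSums, add_comm]
  rw [hdrop]
  rfl

-- B's index loop from k to the end, starting at the invariant state
theorem b_loop (A : List Int) : ∀ (j k : Nat), j = A.length - k → 1 ≤ k → k ≤ A.length →
    ((PySem.List.pyRange (k : Int) (A.length : Int) 1).foldl
        (fun p i => PySem.List.pySetD p i (PySem.List.pyGetD p i 0 + PySem.List.pyGetD p (i - 1) 0))
        (preSums 0 (A.take k) ++ A.drop k))
      = preSums 0 A := by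
  intro j
  induction j with
  | zero =>
    intro k hj h1 h2
    have hk : k = A.length := by omega
    rw [PySem.List.pyRange_one_eq_nil (by omega)]
    simp [hk, List.take_length]
  | succ n ih =>
    intro k hj h1 h2
    have hlt : k < A.length := by omega
    rw [PySem.List.pyRange_one_cons (by exact_mod_cast hlt), List.foldl_cons]
    rw [b_step A k h1 hlt]
    have hc : (k : Int) + 1 = ((k + 1 : Nat) : Int) := by omega
    rw [hc]
    exact ih (k + 1) (by omega) (by omega) (by omega)

theorem cumsum_and_erase_eq (A : List Int) (erase : Int) :
    cumsum_and_erase A erase = cumsum_and_erase_alt A erase := by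
  unfold cumsum_and_erase cumsum_and_erase_alt
  rw [a_fold erase A 0 []]
  cases A with
  | nil => simp [preSums, PySem.List.pyRange]
  | cons x xs =>
    have hstate : (x :: xs) = preSums 0 ((x :: xs).take 1) ++ (x :: xs).drop 1 := by
      simp [preSums]
    have hB := b_loop (x :: xs) ((x :: xs).length - 1) 1 rfl (by omega) (by simp)
    rw [← hstate] at hB
    simp only [List.length_cons, Nat.cast_add, Nat.cast_one] at hB
    simp [hB]

-- ===== VERDICT (by name: the statement is the Claim_ definition above) =====
theorem cumsum_and_erase_spec : Claim_equal_cumsum_and_erase := by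
  intro A erase _
  exact cumsum_and_erase_eq A erase
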